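-- pv_equiv track=rewrite | github.com/Stage-11-Agentics/lattice | scripts/lattice_art.py | make_word_lattice
-- ===== SOURCE A (Python) =====
-- def make_word_lattice(word: str = "LATTICE", cols: int = 56, rows: int = 12) -> list[list[int]]:
--     """Render the word with a lattice/grid texture overlaid."""
--     # Simple 5x7 bitmap font for the letters we need
--     font = {
--         'L': [
--             "1    ",
--             "1    ",
--             "1    ",
--             "1    ",
--             "1    ",
--             "1    ",
--             "11111",
--         ],
--         'A': [
--             " 111 ",
--             "1   1",
--             "1   1",
--             "11111",
--             "1   1",
--             "1   1",
--             "1   1",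
--         ],
--         'T': [
--             "11111",
--             "  1  ",
--             "  1  ",
--             "  1  ",
--             "  1  ",
--             "  1  ",
--             "  1  ",
--         ],
--         'I': [
--             "11111",
--             "  1  ",
--             "  1  ",
--             "  1  ",
--             "  1  ",
--             "  1  ",
--             "11111",
--         ],
--         'C': [
--             " 1111",
--             "1    ",
--             "1    ",
--             "1    ",
--             "1    ",
--             "1    ",
--             " 1111",
--         ],
--         'E': [
--             "11111",
--             "1    ",
--             "1    ",
--             "1111 ",
--             "1    ",
--             "1    ",
--             "11111",
--         ],
--     }
--
--     # Calculate dimensions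
--     char_w = 5
--     char_h = 7
--     spacing = 2
--     total_w = len(word) * (char_w + spacing) - spacing
--
--     # Center in grid
--     x_off = max(0, (cols - total_w) // 2)
--     y_off = max(0, (rows - char_h) // 2)
--
--     grid = [[0] * cols for _ in range(rows)]
--
--     for ci, ch in enumerate(word):
--         if ch not in font:
--             continue
--         bx = x_off + ci * (char_w + spacing)
--         for dy, row_str in enumerate(font[ch]):
--             for dx, pixel in enumerate(row_str):
--                 px, py = bx + dx, y_off + dy
--                 if 0 <= px < cols and 0 <= py < rows and pixel == '1':
--                     grid[py][px] = 1
--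
--     return grid
-- ===== SOURCE B (Python) =====
-- def make_word_lattice(word: str = "LATTICE", cols: int = 56, rows: int = 12) -> list[list[int]]:
--     """Render the word as a bitmap: compute each grid cell directly (gather) from a bitmask font."""
--     # 5x7 font, one 5-bit mask per glyph row (bit 4 = leftmost column)
--     font = {
--         'L': [16, 16, 16, 16, 16, 16, 31],
--         'A': [14, 17, 17, 31, 17, 17, 17],
--         'T': [31, 4, 4, 4, 4, 4, 4],
--         'I': [31, 4, 4, 4, 4, 4, 31],
--         'C': [15, 16, 16, 16, 16, 16, 15],
--         'E': [31, 16, 16, 30, 16, 16, 31],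
--     }
--     char_w, char_h, spacing = 5, 7, 2
--     total_w = len(word) * (char_w + spacing) - spacing
--     x_off = max(0, (cols - total_w) // 2)
--     y_off = max(0, (rows - char_h) // 2)
--
--     def on(dy, x):
--         # which character / glyph column covers grid column x, and is that pixel lit?
--         dx = x - x_off
--         if dx < 0:
--             return False
--         ci, k = divmod(dx, char_w + spacing)
--         if ci >= len(word) or k >= char_w:
--             return False
--         masks = font.get(word[ci])
--         return masks is not None and masks[dy] // 2 ** (char_w - 1 - k) % 2 == 1
--
--     return [[1 if on(y - y_off, x) else 0 for x in range(cols)]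
--             if 0 <= y - y_off < char_h else [0] * cols
--             for y in range(rows)]
-- ===== Notes on version B (the rewrite author's own statement) =====
-- stated objective: alternative
-- what changed: B computes each grid cell directly (gather: invert the layout geometry with divmod to find the covering character and glyph column, then test a bit of a bitmask-encoded font) instead of A's scatter of per-pixel writes from a char-matrix font into a mutable grid.
import Mathlib
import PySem

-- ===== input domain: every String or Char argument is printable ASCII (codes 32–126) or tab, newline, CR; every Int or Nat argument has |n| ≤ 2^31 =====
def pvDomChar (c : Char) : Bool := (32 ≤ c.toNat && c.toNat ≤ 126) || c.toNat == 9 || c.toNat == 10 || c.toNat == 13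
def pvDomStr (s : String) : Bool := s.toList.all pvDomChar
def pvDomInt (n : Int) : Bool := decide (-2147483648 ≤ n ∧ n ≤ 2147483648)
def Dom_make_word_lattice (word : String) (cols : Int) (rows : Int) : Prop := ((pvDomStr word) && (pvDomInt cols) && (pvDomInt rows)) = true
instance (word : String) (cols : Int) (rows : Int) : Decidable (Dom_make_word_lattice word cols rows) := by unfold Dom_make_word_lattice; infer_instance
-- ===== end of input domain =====

-- B replaces A's scatter (per-pixel writes into a mutable grid, char-matrix font) by a gather
-- (each cell computed directly by inverting the layout geometry with divmod, against a bitmask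
-- font); alternative decomposition, same cost.

-- ===== PORT A =====
-- the font dict, as a lookup function Char → Option (glyph rows as char lists); exact for the six keys
def fontA (c : Char) : Option (List (List Char)) :=
  if c = 'L' then some [['1', ' ', ' ', ' ', ' '], ['1', ' ', ' ', ' ', ' '], ['1', ' ', ' ', ' ', ' '], ['1', ' ', ' ', ' ', ' '], ['1', ' ', ' ', ' ', ' '], ['1', ' ', ' ', ' ', ' '], ['1', '1', '1', '1', '1']]
  else if c = 'A' then some [[' ', '1', '1', '1', ' '], ['1', ' ', ' ', ' ', '1'], ['1', ' ', ' ', ' ', '1'], ['1', '1', '1', '1', '1'], ['1', ' ', ' ', ' ', '1'], ['1', ' ', ' ', ' ', '1'], ['1', ' ', ' ', ' ', '1']]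
  else if c = 'T' then some [['1', '1', '1', '1', '1'], [' ', ' ', '1', ' ', ' '], [' ', ' ', '1', ' ', ' '], [' ', ' ', '1', ' ', ' '], [' ', ' ', '1', ' ', ' '], [' ', ' ', '1', ' ', ' '], [' ', ' ', '1', ' ', ' ']]
  else if c = 'I' then some [['1', '1', '1', '1', '1'], [' ', ' ', '1', ' ', ' '], [' ', ' ', '1', ' ', ' '], [' ', ' ', '1', ' ', ' '], [' ', ' ', '1', ' ', ' '], [' ', ' ', '1', ' ', ' '], ['1', '1', '1', '1', '1']]
  else if c = 'C' then some [[' ', '1', '1', '1', '1'], ['1', ' ', ' ', ' ', ' '], ['1', ' ', ' ', ' ', ' '], ['1', ' ', ' ', ' ', ' '], ['1', ' ', ' ', ' ', ' '], ['1', ' ', ' ', ' ', ' '], [' ', '1', '1', '1', '1']]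
  else if c = 'E' then some [['1', '1', '1', '1', '1'], ['1', ' ', ' ', ' ', ' '], ['1', ' ', ' ', ' ', ' '], ['1', '1', '1', '1', ' '], ['1', ' ', ' ', ' ', ' '], ['1', ' ', ' ', ' ', ' '], ['1', '1', '1', '1', '1']]
  else none

-- grid[py][px] = 1
def pwrite (g : List (List Int)) (py px : Nat) : List (List Int) :=
  g.modify py (fun r => r.set px 1)

def make_word_lattice (word : String) (cols : Int) (rows : Int) : List (List Int) :=
  let char_w : Int := 5
  let char_h : Int := 7
  let spacing : Int := 2
  let total_w : Int := (word.toList.length : Int) * (char_w + spacing) - spacing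
  let x_off : Int := max 0 (PySem.Int.floordiv (cols - total_w) 2)
  let y_off : Int := max 0 (PySem.Int.floordiv (rows - char_h) 2)
  let grid : List (List Int) := List.replicate rows.toNat (List.replicate cols.toNat 0)
  (PySem.List.enumerate word.toList).foldl (fun g p =>
    match fontA p.2 with
    | none => g
    | some f =>
      let bx : Int := x_off + p.1 * (char_w + spacing)
      (PySem.List.enumerate f).foldl (fun g q =>
        (PySem.List.enumerate q.2).foldl (fun g r =>
          let px : Int := bx + r.1
          let py : Int := y_off + q.1
          if 0 ≤ px ∧ px < cols ∧ 0 ≤ py ∧ py < rows ∧ r.2 = '1' then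
            pwrite g py.toNat px.toNat
          else g) g) g) grid

-- ===== PORT B =====
-- Source B's bitmask font: one 5-bit row mask per glyph row (bit 4 = leftmost column)
def fontM (c : Char) : Option (List Int) :=
  if c = 'L' then some [16, 16, 16, 16, 16, 16, 31]
  else if c = 'A' then some [14, 17, 17, 31, 17, 17, 17]
  else if c = 'T' then some [31, 4, 4, 4, 4, 4, 4]
  else if c = 'I' then some [31, 4, 4, 4, 4, 4, 31]
  else if c = 'C' then some [15, 16, 16, 16, 16, 16, 15]
  else if c = 'E' then some [31, 16, 16, 30, 16, 16, 31]
  else none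

-- Source B's inner `on(dy, x)`: which character / glyph column covers grid column x, is it lit?
def onB (word : List Char) (x_off : Int) (dy x : Int) : Bool :=
  let dx := x - x_off
  if dx < 0 then false
  else
    let ci := PySem.Int.floordiv dx 7
    let k := PySem.Int.mod dx 7
    if (word.length : Int) ≤ ci ∨ 5 ≤ k then false
    else
      match fontM (PySem.List.pyGetD word ci ' ') with
      | none => false
      | some m =>
        PySem.Int.mod (PySem.Int.floordiv (PySem.List.pyGetD m dy 0) ((2 : Int) ^ (4 - k).toNat)) 2 == 1

def make_word_lattice_alt (word : String) (cols : Int) (rows : Int) : List (List Int) :=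
  let total_w : Int := (word.toList.length : Int) * (5 + 2) - 2
  let x_off : Int := max 0 (PySem.Int.floordiv (cols - total_w) 2)
  let y_off : Int := max 0 (PySem.Int.floordiv (rows - 7) 2)
  (List.range rows.toNat).map (fun (y : Nat) =>
    if 0 ≤ (y : Int) - y_off ∧ (y : Int) - y_off < 7 then
      (List.range cols.toNat).map (fun (x : Nat) =>
        if onB word.toList x_off ((y : Int) - y_off) (x : Int) then 1 else 0)
    else List.replicate cols.toNat 0)

-- ===== PRECONDITION & SPEC =====
def Spec_make_word_lattice (word : String) (cols : Int) (rows : Int) (out : List (List Int)) : Prop := out = make_word_lattice_alt word cols rows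
instance (word : String) (cols : Int) (rows : Int) (out : List (List Int)) : Decidable (Spec_make_word_lattice word cols rows out) := by unfold Spec_make_word_lattice; infer_instance

-- ===== CLAIM (what is proved, stated in full; the proofs are below) =====
def Claim_equal_make_word_lattice : Prop := ∀ (word : String) (cols : Int) (rows : Int), Dom_make_word_lattice word cols rows → Spec_make_word_lattice word cols rows (make_word_lattice word cols rows)

-- ===== LEMMAS AND PROOFS =====

-- the (y,x) entry of a grid, default 0
def cell (g : List (List Int)) (y x : Nat) : Int := (g.getD y []).getD x 0

-- g is an R×C grid
def Shape (g : List (List Int)) (R C : Nat) : Prop :=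
  g.length = R ∧ ∀ r ∈ g, r.length = C

-- g' arises from g by writing 1 exactly at the in-range cells where W holds
def Writes (W : Nat → Nat → Bool) (R C : Nat) (g g' : List (List Int)) : Prop :=
  Shape g' R C ∧ ∀ y x, y < R → x < C → cell g' y x = if W y x then 1 else cell g y x

lemma writes_id {R C : Nat} {g : List (List Int)} (h : Shape g R C) :
    Writes (fun _ _ => false) R C g g := by
  refine ⟨h, ?_⟩; intro y x _ _; simp

lemma writes_congr {W W' : Nat → Nat → Bool} {R C : Nat} {g g' : List (List Int)}
    (he : ∀ y x, y < R → x < C → W' y x = W y x) (h : Writes W R C g g') :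
    Writes W' R C g g' := by
  refine ⟨h.1, ?_⟩; intro y x hy hx; rw [he y x hy hx]; exact h.2 y x hy hx

lemma writes_trans {W1 W2 : Nat → Nat → Bool} {R C : Nat} {g g1 g2 : List (List Int)}
    (h1 : Writes W1 R C g g1) (h2 : Writes W2 R C g1 g2) :
    Writes (fun y x => W1 y x || W2 y x) R C g g2 := by
  refine ⟨h2.1, ?_⟩
  intro y x hy hx
  rw [h2.2 y x hy hx, h1.2 y x hy hx]
  cases hW2 : W2 y x <;> cases hW1 : W1 y x <;> simp [hW2, hW1]

lemma shape_pwrite {R C : Nat} {g : List (List Int)} (h : Shape g R C) (py px : Nat) :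
    Shape (pwrite g py px) R C := by
  obtain ⟨hl, hr⟩ := h
  refine ⟨by simpa [pwrite] using hl, ?_⟩
  intro r hmem
  obtain ⟨i, hi⟩ := List.mem_iff_getElem?.1 hmem
  rw [pwrite, List.getElem?_modify] at hi
  cases hg : g[i]? with
  | none =>
    rw [hg] at hi
    exact absurd hi (by simp)
  | some row =>
    have hrowmem : row ∈ g := List.mem_of_getElem? hg
    rw [hg] at hi
    simp only [Option.map_eq_map, Option.map_some, Option.some.injEq] at hi
    subst hi
    by_cases hpi : py = i <;> simp [hpi, List.length_set, hr row hrowmem]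

lemma cell_pwrite {R C : Nat} {g : List (List Int)} (h : Shape g R C) {py px : Nat}
    (_hpy : py < R) (hpx : px < C) (y x : Nat) (hy : y < R) (hx : x < C) :
    cell (pwrite g py px) y x = if py = y ∧ px = x then 1 else cell g y x := by
  obtain ⟨hl, hrows⟩ := h
  have hylt : y < g.length := by omega
  have hrowlen : (g[y]).length = C := hrows _ (List.getElem_mem hylt)
  simp only [cell, pwrite, List.getD_eq_getElem?_getD]
  rw [List.getElem?_modify]
  by_cases hpy2 : py = y
  · subst hpy2
    rw [List.getElem?_eq_getElem hylt]
    by_cases hpx2 : px = x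
    · subst hpx2
      have hlt : px < g[py].length := by omega
      simp [hlt]
    · simp [hpx2]
  · simp [hpy2]

lemma writes_pwrite {R C : Nat} {g : List (List Int)} (h : Shape g R C)
    (c : Prop) [Decidable c] (py px : Nat) (hin : c → py < R ∧ px < C) :
    Writes (fun y x => decide c && (py == y) && (px == x)) R C g
      (if c then pwrite g py px else g) := by
  by_cases hc : c
  · obtain ⟨h1, h2⟩ := hin hc
    refine ⟨by simp [hc, shape_pwrite h], ?_⟩
    intro y x hy hx
    simp only [if_pos hc]
    rw [cell_pwrite h h1 h2 y x hy hx]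
    by_cases hyx : py = y ∧ px = x
    · simp [hc, hyx]
    · simp [hc, hyx]
  · refine ⟨by simp [hc]; exact h, ?_⟩
    intro y x hy hx
    simp [hc]

lemma writes_foldl {α : Type} {R C : Nat} (L : List α)
    (step : List (List Int) → α → List (List Int)) (W : α → Nat → Nat → Bool)
    (h : ∀ a ∈ L, ∀ g, Shape g R C → Writes (W a) R C g (step g a)) :
    ∀ g, Shape g R C → Writes (fun y x => L.any (fun a => W a y x)) R C g (L.foldl step g) := by
  induction L with
  | nil => intro g hg; simpa using writes_id hg
  | cons hd tl ih =>
    intro g hg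
    have h1 := h hd (by simp) g hg
    have h2 := ih (fun a ha => h a (by simp [ha])) (step g hd) h1.1
    have := writes_trans h1 h2
    refine writes_congr ?_ this
    intro y x _ _; simp

-- the write-predicate contributed by one character of the word (proof-side normal form of A's inner loops)
def WAfun (cols rows xo yo : Int) (p : Int × Char) (y x : Nat) : Bool :=
  match fontA p.2 with
  | none => false
  | some f =>
    (PySem.List.enumerate f).any fun q =>
      (PySem.List.enumerate q.2).any fun r =>
        decide (0 ≤ xo + p.1 * (5 + 2) + r.1 ∧ xo + p.1 * (5 + 2) + r.1 < cols ∧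
          0 ≤ yo + q.1 ∧ yo + q.1 < rows ∧ r.2 = '1')
        && ((yo + q.1).toNat == y) && ((xo + p.1 * (5 + 2) + r.1).toNat == x)

-- A's per-character blit, with the let-bindings of the port zeta-expanded
def stepA (cols rows xo yo : Int) (g : List (List Int)) (p : Int × Char) : List (List Int) :=
  match fontA p.2 with
  | none => g
  | some f =>
    (PySem.List.enumerate f).foldl (fun g q =>
      (PySem.List.enumerate q.2).foldl (fun g r =>
      if 0 ≤ xo + p.1 * (5 + 2) + r.1 ∧ xo + p.1 * (5 + 2) + r.1 < cols ∧
          0 ≤ yo + q.1 ∧ yo + q.1 < rows ∧ r.2 = '1' then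
        pwrite g (yo + q.1).toNat (xo + p.1 * (5 + 2) + r.1).toNat
      else g) g) g

lemma fontA_shape (c : Char) (f : List (List Char)) (h : fontA c = some f) :
    f.length = 7 ∧ ∀ row ∈ f, row.length = 5 := by
  unfold fontA at h
  split_ifs at h
  all_goals injection h with h'
  all_goals (subst h'; decide)

-- the char-matrix font and the bitmask font describe the same glyphs, pixel for pixel
def BitsOK (f : List (List Char)) (m : List Int) : Prop :=
  ∀ (dy : Nat), dy < 7 → ∀ (k : Nat), k < 5 →
    (PySem.Int.mod (PySem.Int.floordiv (PySem.List.pyGetD m (dy : Int) 0)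
        ((2 : Int) ^ ((4 : Int) - (k : Int)).toNat)) 2 = 1
      ↔ (f.getD dy []).getD k ' ' = '1')

lemma font_link (c : Char) :
    (fontA c = none ∧ fontM c = none) ∨
      ∃ f m, fontA c = some f ∧ fontM c = some m ∧ BitsOK f m := by
  unfold fontA fontM
  split_ifs
  case _ => exact Or.inr ⟨_, _, rfl, rfl, by unfold BitsOK; decide⟩
  case _ => exact Or.inr ⟨_, _, rfl, rfl, by unfold BitsOK; decide⟩
  case _ => exact Or.inr ⟨_, _, rfl, rfl, by unfold BitsOK; decide⟩
  case _ => exact Or.inr ⟨_, _, rfl, rfl, by unfold BitsOK; decide⟩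
  case _ => exact Or.inr ⟨_, _, rfl, rfl, by unfold BitsOK; decide⟩
  case _ => exact Or.inr ⟨_, _, rfl, rfl, by unfold BitsOK; decide⟩
  case _ => exact Or.inl ⟨rfl, rfl⟩

lemma WAfun_eq (cols rows xo yo : Int) (i : Int) (c : Char) (f : List (List Char))
    (hf : fontA c = some f) (y x : Nat) :
    WAfun cols rows xo yo (i, c) y x =
      ((PySem.List.enumerate f).any fun q =>
        (PySem.List.enumerate q.2).any fun r =>
          decide (0 ≤ xo + i * (5 + 2) + r.1 ∧ xo + i * (5 + 2) + r.1 < cols ∧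
            0 ≤ yo + q.1 ∧ yo + q.1 < rows ∧ r.2 = '1')
          && ((yo + q.1).toNat == y) && ((xo + i * (5 + 2) + r.1).toNat == x)) := by
  unfold WAfun
  simp only
  rw [hf]

lemma bridge (wl : List Char) (cols rows xo yo : Int) (hxo : 0 ≤ xo) (hyo : 0 ≤ yo)
    (y x : Nat) (hy : (y : Int) < rows) (hx : (x : Int) < cols) :
    ((PySem.List.enumerate wl).any fun p => WAfun cols rows xo yo p y x)
      = (if 0 ≤ (y : Int) - yo ∧ (y : Int) - yo < 7 then
          onB wl xo ((y : Int) - yo) (x : Int) else false) := by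
  rw [Bool.eq_iff_iff]
  constructor
  · intro hA
    rw [List.any_eq_true] at hA
    obtain ⟨p, hp, hWp⟩ := hA
    rw [PySem.List.mem_enumerate_iff] at hp
    obtain ⟨ci, hci, rfl⟩ := hp
    unfold WAfun at hWp
    simp only at hWp
    cases hfont : fontA wl[ci] with
    | none => rw [hfont] at hWp; exact absurd hWp (by simp)
    | some f =>
      rw [hfont] at hWp
      obtain ⟨hf7, hrow5⟩ := fontA_shape _ _ hfont
      obtain ⟨m, hM, hbits⟩ :
          ∃ m, fontM wl[ci] = some m ∧ BitsOK f m := by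
        rcases font_link wl[ci] with ⟨h1, _⟩ | ⟨f', m, h1, h2, h3⟩
        · rw [hfont] at h1; exact absurd h1 (by simp)
        · rw [hfont] at h1; injection h1 with h1'; subst h1'; exact ⟨m, h2, h3⟩
      rw [List.any_eq_true] at hWp
      obtain ⟨q, hq, hWq⟩ := hWp
      rw [PySem.List.mem_enumerate_iff] at hq
      obtain ⟨dy, hdy, rfl⟩ := hq
      rw [List.any_eq_true] at hWq
      obtain ⟨r, hr, hWr⟩ := hWq
      rw [PySem.List.mem_enumerate_iff] at hr
      obtain ⟨dx, hdx, rfl⟩ := hr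
      simp only [Bool.and_eq_true, decide_eq_true_eq, beq_iff_eq] at hWr
      obtain ⟨⟨⟨hpx0, hpxc, hpy0, hpyr, hpix⟩, hyEq⟩, hxEq⟩ := hWr
      have hdxlen : dx < (f[dy]).length := hdx
      have hdx5 : dx < 5 := by
        have := hrow5 _ (List.getElem_mem hdy)
        omega
      have hdy7 : dy < 7 := by omega
      have hpix' : f[dy][dx] = '1' := hpix
      have hyI : (y : Int) = yo + dy := by omega
      have hxI : (x : Int) = xo + ci * (5 + 2) + dx := by omega
      rw [if_pos (show 0 ≤ (y : Int) - yo ∧ (y : Int) - yo < 7 by omega)]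
      simp only [onB]
      rw [if_neg (by omega)]
      rw [PySem.Int.floordiv_eq_ediv_of_pos (show (0:Int) < 7 by norm_num),
        PySem.Int.mod_eq_emod_of_pos (show (0:Int) < 7 by norm_num)]
      have hdiv : ((x : Int) - xo) / 7 = (ci : Int) := by omega
      have hmod : ((x : Int) - xo) % 7 = (dx : Int) := by omega
      rw [hdiv, hmod]
      rw [if_neg (by omega)]
      have hw : PySem.List.pyGetD wl (ci : Int) ' ' = wl[ci] := by
        rw [PySem.List.pyGetD_of_nonneg _ _ (by omega)]
        simp [List.getD_eq_getElem?_getD, List.getElem?_eq_getElem hci]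
      have hyd : (y : Int) - yo = (dy : Int) := by omega
      rw [hyd, hw, hM]
      have := (hbits dy hdy7 dx hdx5).mpr (by
        simp [List.getD_eq_getElem?_getD, List.getElem?_eq_getElem hdy,
          List.getElem?_eq_getElem hdxlen, hpix'])
      simpa using this
  · intro hB
    rcases (em (0 ≤ (y : Int) - yo ∧ (y : Int) - yo < 7)) with hc1 | hc1
    swap
    · rw [if_neg hc1] at hB
      exact absurd hB (by simp)
    rw [if_pos hc1] at hB
    simp only [onB] at hB
    rw [PySem.Int.floordiv_eq_ediv_of_pos (show (0:Int) < 7 by norm_num),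
      PySem.Int.mod_eq_emod_of_pos (show (0:Int) < 7 by norm_num)] at hB
    split at hB
    · exact absurd hB (by simp)
    rename_i hc2
    split at hB
    · exact absurd hB (by simp)
    rename_i hc3
    split at hB
    · exact absurd hB (by simp)
    rename_i m heq
    have hdx0 : 0 ≤ (x : Int) - xo := by omega
    have hci0 : 0 ≤ ((x : Int) - xo) / 7 := by omega
    have hk0 : 0 ≤ ((x : Int) - xo) % 7 := by omega
    have hk7 : ((x : Int) - xo) % 7 < 7 := by omega
    have hcilen : ((x : Int) - xo) / 7 < (wl.length : Int) := by omega
    have hk5 : ((x : Int) - xo) % 7 < 5 := by omega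
    have hciNl : (((x : Int) - xo) / 7).toNat < wl.length := by omega
    have hwlk : PySem.List.pyGetD wl (((x : Int) - xo) / 7) ' '
        = wl[(((x : Int) - xo) / 7).toNat]'hciNl := by
      rw [PySem.List.pyGetD_of_nonneg wl ' ' hci0]
      simp [List.getD_eq_getElem?_getD, List.getElem?_eq_getElem hciNl]
    rw [hwlk] at heq
    obtain ⟨f, hfont, hbits⟩ :
        ∃ f, fontA (wl[(((x : Int) - xo) / 7).toNat]'hciNl) = some f ∧ BitsOK f m := by
      rcases font_link (wl[(((x : Int) - xo) / 7).toNat]'hciNl) with ⟨_, h2⟩ | ⟨f, m', h1, h2, h3⟩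
      · rw [heq] at h2; exact absurd h2 (by simp)
      · rw [heq] at h2; injection h2 with h2'; subst h2'; exact ⟨f, h1, h3⟩
    obtain ⟨hf7, hrow5⟩ := fontA_shape _ _ hfont
    have hdyNl : ((y : Int) - yo).toNat < f.length := by omega
    have hkNl : (((x : Int) - xo) % 7).toNat < (f[((y : Int) - yo).toNat]'hdyNl).length := by
      have := hrow5 _ (List.getElem_mem hdyNl)
      omega
    have hpixB : (f[((y : Int) - yo).toNat]'hdyNl)[(((x : Int) - xo) % 7).toNat]'hkNl = '1' := by
      have hcast1 : ((y : Int) - yo) = ((((y : Int) - yo).toNat : Nat) : Int) := by omega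
      have hcast2 : (((x : Int) - xo) % 7) = (((((x : Int) - xo) % 7).toNat : Nat) : Int) := by omega
      have := (hbits (((y : Int) - yo).toNat) (by omega) ((((x : Int) - xo) % 7).toNat) (by omega)).mp (by
        rw [← hcast1, ← hcast2]
        exact beq_iff_eq.mp hB)
      simpa [List.getD_eq_getElem?_getD, List.getElem?_eq_getElem hdyNl,
        List.getElem?_eq_getElem hkNl] using this
    rw [List.any_eq_true]
    refine ⟨(0 + ((((x : Int) - xo) / 7).toNat : Int), wl[(((x : Int) - xo) / 7).toNat]'hciNl),
      (PySem.List.mem_enumerate_iff _ _ _).mpr ⟨_, hciNl, rfl⟩, ?_⟩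
    rw [WAfun_eq cols rows xo yo _ _ f hfont]
    rw [List.any_eq_true]
    refine ⟨(0 + (((y : Int) - yo).toNat : Int), f[((y : Int) - yo).toNat]'hdyNl),
      (PySem.List.mem_enumerate_iff _ _ _).mpr ⟨_, hdyNl, rfl⟩, ?_⟩
    rw [List.any_eq_true]
    refine ⟨(0 + ((((x : Int) - xo) % 7).toNat : Int),
      (f[((y : Int) - yo).toNat]'hdyNl)[(((x : Int) - xo) % 7).toNat]'hkNl),
      (PySem.List.mem_enumerate_iff _ _ _).mpr ⟨_, hkNl, rfl⟩, ?_⟩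
    simp only [Bool.and_eq_true, decide_eq_true_eq, beq_iff_eq]
    refine ⟨⟨⟨by omega, by omega, by omega, by omega, hpixB⟩, by omega⟩, by omega⟩

lemma stepA_writes (wl : List Char) (cols rows xo yo : Int) :
    ∀ p ∈ PySem.List.enumerate wl, ∀ g, Shape g rows.toNat cols.toNat →
      Writes (WAfun cols rows xo yo p) rows.toNat cols.toNat g (stepA cols rows xo yo g p) := by
  intro p hp g hg
  cases hfont : fontA p.2 with
  | none =>
    unfold stepA
    rw [hfont]
    exact writes_congr (fun y x _ _ => by simp [WAfun, hfont]) (writes_id hg)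
  | some f =>
    unfold stepA
    rw [hfont]
    have hr3 : ∀ (q : Int × List Char), ∀ r ∈ PySem.List.enumerate q.2, ∀ g3,
        Shape g3 rows.toNat cols.toNat →
        Writes (fun y x => decide (0 ≤ xo + p.1 * (5 + 2) + r.1 ∧ xo + p.1 * (5 + 2) + r.1 < cols ∧
          0 ≤ yo + q.1 ∧ yo + q.1 < rows ∧ r.2 = '1')
        && ((yo + q.1).toNat == y) && ((xo + p.1 * (5 + 2) + r.1).toNat == x)) rows.toNat cols.toNat g3
          (((fun g r =>
      if 0 ≤ xo + p.1 * (5 + 2) + r.1 ∧ xo + p.1 * (5 + 2) + r.1 < cols ∧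
          0 ≤ yo + q.1 ∧ yo + q.1 < rows ∧ r.2 = '1' then
        pwrite g (yo + q.1).toNat (xo + p.1 * (5 + 2) + r.1).toNat
      else g)) g3 r) := by
      intro q r hr g3 hg3
      refine writes_pwrite hg3 _ _ _ ?_
      intro hc
      omega
    have hq2 : ∀ q ∈ PySem.List.enumerate f, ∀ g2, Shape g2 rows.toNat cols.toNat →
        Writes (fun y x => (PySem.List.enumerate q.2).any fun r => decide (0 ≤ xo + p.1 * (5 + 2) + r.1 ∧ xo + p.1 * (5 + 2) + r.1 < cols ∧
          0 ≤ yo + q.1 ∧ yo + q.1 < rows ∧ r.2 = '1')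
        && ((yo + q.1).toNat == y) && ((xo + p.1 * (5 + 2) + r.1).toNat == x))
          rows.toNat cols.toNat g2
          ((PySem.List.enumerate q.2).foldl (fun g r =>
      if 0 ≤ xo + p.1 * (5 + 2) + r.1 ∧ xo + p.1 * (5 + 2) + r.1 < cols ∧
          0 ≤ yo + q.1 ∧ yo + q.1 < rows ∧ r.2 = '1' then
        pwrite g (yo + q.1).toNat (xo + p.1 * (5 + 2) + r.1).toNat
      else g) g2) := by
      intro q hq g2 hg2
      exact writes_foldl _ _ _ (fun r hr => hr3 q r hr) g2 hg2
    have hW2 := writes_foldl (PySem.List.enumerate f)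
      (fun g q => (PySem.List.enumerate q.2).foldl (fun g r =>
      if 0 ≤ xo + p.1 * (5 + 2) + r.1 ∧ xo + p.1 * (5 + 2) + r.1 < cols ∧
          0 ≤ yo + q.1 ∧ yo + q.1 < rows ∧ r.2 = '1' then
        pwrite g (yo + q.1).toNat (xo + p.1 * (5 + 2) + r.1).toNat
      else g) g)
      (fun q y x => (PySem.List.enumerate q.2).any fun r => decide (0 ≤ xo + p.1 * (5 + 2) + r.1 ∧ xo + p.1 * (5 + 2) + r.1 < cols ∧
          0 ≤ yo + q.1 ∧ yo + q.1 < rows ∧ r.2 = '1')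
        && ((yo + q.1).toNat == y) && ((xo + p.1 * (5 + 2) + r.1).toNat == x)) hq2 g hg
    exact writes_congr (fun y x _ _ => by simp [WAfun, hfont]) hW2

lemma main_aux (wl : List Char) (cols rows xo yo : Int) (hxo : 0 ≤ xo) (hyo : 0 ≤ yo) :
    (PySem.List.enumerate wl).foldl (stepA cols rows xo yo)
        (List.replicate rows.toNat (List.replicate cols.toNat 0))
      = (List.range rows.toNat).map (fun (y : Nat) =>
          if 0 ≤ (y : Int) - yo ∧ (y : Int) - yo < 7 then
            (List.range cols.toNat).map (fun (x : Nat) =>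
              if onB wl xo ((y : Int) - yo) (x : Int) then 1 else 0)
          else List.replicate cols.toNat 0) := by
  have hg0 : Shape (List.replicate rows.toNat (List.replicate cols.toNat (0 : Int)))
      rows.toNat cols.toNat := by
    refine ⟨List.length_replicate, ?_⟩
    intro r hr
    rw [List.eq_of_mem_replicate hr]
    exact List.length_replicate
  obtain ⟨hsh, hcell⟩ := writes_foldl (PySem.List.enumerate wl) (stepA cols rows xo yo)
    (fun p => WAfun cols rows xo yo p) (stepA_writes wl cols rows xo yo) _ hg0
  set G := (PySem.List.enumerate wl).foldl (stepA cols rows xo yo)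
    (List.replicate rows.toNat (List.replicate cols.toNat (0 : Int))) with hGdef
  have hcell0 : ∀ y x : Nat, y < rows.toNat → x < cols.toNat →
      cell (List.replicate rows.toNat (List.replicate cols.toNat (0 : Int))) y x = 0 := by
    intro y x hy hx
    simp [cell, List.getD_eq_getElem?_getD, hy, hx]
  apply List.ext_getElem
  · rw [hsh.1]; simp
  intro i hi hi'
  have hiR : i < rows.toNat := by rw [← hsh.1]; exact hi
  apply List.ext_getElem
  · calc _ = cols.toNat := hsh.2 _ (List.getElem_mem hi)
      _ = _ := by
        simp only [List.getElem_map, List.getElem_range]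
        by_cases hband : 0 ≤ (i : Int) - yo ∧ (i : Int) - yo < 7
        · rw [if_pos hband]; simp
        · rw [if_neg hband]; simp
  intro j hj hj'
  have hjC : j < cols.toNat := by rw [← hsh.2 _ (List.getElem_mem hi)]; exact hj
  have hL : (G[i]'hi)[j]'hj = cell G i j := by
    simp [cell, List.getD_eq_getElem?_getD, List.getElem?_eq_getElem hi, List.getElem?_eq_getElem hj]
  rw [hL, hcell i j hiR hjC, hcell0 i j hiR hjC]
  simp only [bridge wl cols rows xo yo hxo hyo i j (by omega) (by omega),
    List.getElem_map, List.getElem_range]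
  by_cases hband : 0 ≤ (i : Int) - yo ∧ (i : Int) - yo < 7
  · simp only [if_pos hband, List.getElem_map, List.getElem_range]
  · simp only [if_neg hband, List.getElem_replicate]
    simp

theorem make_word_lattice_eq (word : String) (cols : Int) (rows : Int) :
    make_word_lattice word cols rows = make_word_lattice_alt word cols rows :=
  main_aux word.toList cols rows _ _ (le_max_left 0 _) (le_max_left 0 _)

-- ===== VERDICT (by name: the statement is the Claim_ definition above) =====
theorem make_word_lattice_spec : Claim_equal_make_word_lattice := by
  intro word cols rows _
  unfold Spec_make_word_lattice
  exact make_word_lattice_eq word cols rows
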